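-- pv_equiv track=rewrite | github.com/kacperklusek/ASD | zachlanne/przedz_jednostkowe.py | do_the_magic
-- ===== SOURCE A (Python) =====
-- def do_the_magic(T):
--     n = len(T)
--     output = [None]
--
--     i = 0
--     while i < n:
--         start = T[i]
--         i += 1
--         stop = start + 1
--
--         while i  < n and T[i] <= stop:
--             i += 1
--
--         output.append((start, stop))
--
--     return output
-- ===== SOURCE B (Python) =====
-- def do_the_magic(T):
--     # Stage 1: scan - running interval boundary after each element.
--     stops = []
--     s = None
--     for x in T:
--         if s is None or x > s:
--             s = x + 1
--         stops.append(s)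
--     # Stage 2: change-point detection - an element opens an interval
--     # exactly where the running boundary changed.
--     output = [None]
--     prev = None
--     for x, s in zip(T, stops):
--         if s != prev:
--             output.append((x, s))
--         prev = s
--     return output
-- ===== Notes on version B (the rewrite author's own statement) =====
-- stated objective: alternative
-- what changed: Replaces A's single nested-while pass with shared index bookkeeping by two staged passes: a scan first materialises the running interval boundary at every position, then a change-point detection pass over the zipped list emits (element, boundary) exactly where the boundary changed.
import Mathlib
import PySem

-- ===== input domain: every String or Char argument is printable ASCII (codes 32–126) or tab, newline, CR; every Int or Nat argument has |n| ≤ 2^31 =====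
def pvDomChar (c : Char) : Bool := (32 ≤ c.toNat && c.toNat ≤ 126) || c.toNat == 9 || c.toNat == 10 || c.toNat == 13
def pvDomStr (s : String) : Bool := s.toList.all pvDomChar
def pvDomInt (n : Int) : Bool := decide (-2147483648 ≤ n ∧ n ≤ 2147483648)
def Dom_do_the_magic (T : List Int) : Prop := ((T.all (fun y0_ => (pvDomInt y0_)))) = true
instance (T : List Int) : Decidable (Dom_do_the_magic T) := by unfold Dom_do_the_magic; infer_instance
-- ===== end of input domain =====

-- B replaces A's nested-while single pass by two staged passes (a boundary scan,
-- then change-point detection over the zipped list); objective: alternative decomposition, same O(n).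

-- ===== PORT A =====
-- inner while: advance i while i < n and T[i] <= stop (ported on the remaining suffix)
def pvASkip (stop : Int) : List Int → List Int
  | [] => []
  | x :: xs => if x ≤ stop then pvASkip stop xs else x :: xs

theorem pvASkip_length_le (stop : Int) (xs : List Int) :
    (pvASkip stop xs).length ≤ xs.length := by
  induction xs with
  | nil => simp [pvASkip]
  | cons x xs ih =>
    simp only [pvASkip]
    split
    · exact Nat.le_succ_of_le ih
    · simp

-- outer while over the remaining suffix of T
def pvAOuter : List Int → List (Option (Int × Int))
  | [] => []
  | x :: xs => some (x, x + 1) :: pvAOuter (pvASkip (x + 1) xs)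
termination_by l => l.length
decreasing_by
  exact Nat.lt_succ_of_le (pvASkip_length_le _ _)

def do_the_magic (T : List Int) : List (Option (Int × Int)) :=
  none :: pvAOuter T

-- ===== PORT B =====
-- stage 1: the running boundary after each element ('stops' list; s starts as None)
def pvBStops : Option Int → List Int → List Int
  | _, [] => []
  | s, x :: xs =>
    let s' : Int := match s with
      | none => x + 1
      | some v => if x > v then x + 1 else v
    s' :: pvBStops (some s') xs

-- stage 2: change-point detection over zip T stops (prev starts as None)
def pvBChanges : Option Int → List (Int × Int) → List (Option (Int × Int))
  | _, [] => []
  | prev, (x, s) :: ps =>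
    if some s ≠ prev then some (x, s) :: pvBChanges (some s) ps
    else pvBChanges (some s) ps

def do_the_magic_alt (T : List Int) : List (Option (Int × Int)) :=
  none :: pvBChanges none (T.zip (pvBStops none T))

-- ===== PRECONDITION & SPEC =====
def Spec_do_the_magic (T : List Int) (out : List (Option (Int × Int))) : Prop := out = do_the_magic_alt T
instance (T : List Int) (out : List (Option (Int × Int))) : Decidable (Spec_do_the_magic T out) := by unfold Spec_do_the_magic; infer_instance

-- ===== CLAIM (what is proved, stated in full; the proofs are below) =====
def Claim_equal_do_the_magic : Prop := ∀ (T : List Int), Dom_do_the_magic T → Spec_do_the_magic T (do_the_magic T)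

-- ===== LEMMAS AND PROOFS =====
theorem pvB_invariant (xs : List Int) :
    ∀ (s : Int),
      pvBChanges (some s) (xs.zip (pvBStops (some s) xs)) = pvAOuter (pvASkip s xs) := by
  induction xs with
  | nil => intro s; simp [pvBStops, pvBChanges, pvASkip, pvAOuter]
  | cons x xs ih =>
    intro s
    by_cases h : x ≤ s
    · have hgt : ¬ x > s := not_lt.mpr h
      simp only [pvBStops, if_neg hgt, pvASkip, if_pos h, List.zip_cons_cons,
        pvBChanges, ne_eq, not_true_eq_false, if_false]
      exact ih s
    · have hgt : x > s := lt_of_not_ge h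
      have hne : ¬ (some (x + 1) = some s) := by
        intro hc; injection hc with hc; omega
      simp only [pvBStops, if_pos hgt, pvASkip, if_neg h, List.zip_cons_cons,
        pvBChanges, ne_eq, if_pos hne, pvAOuter]
      exact congrArg _ (ih (x + 1))

-- ===== VERDICT (by name: the statement is the Claim_ definition above) =====
theorem do_the_magic_spec : Claim_equal_do_the_magic := by
  intro T _
  unfold Spec_do_the_magic do_the_magic do_the_magic_alt
  cases T with
  | nil => simp [pvBStops, pvBChanges, pvAOuter]
  | cons x xs =>
    have hne : ¬ (some (x + 1) = (none : Option Int)) := by simp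
    simp only [pvBStops, List.zip_cons_cons, pvBChanges, ne_eq, if_pos hne, pvAOuter]
    exact congrArg _ (congrArg _ (pvB_invariant xs (x + 1)).symm)
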